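-- pv_equiv track=rewrite | github.com/SantiagoPanozzo/Python-PGM1-UCU | PARCIAL 3/Ejercicio2.py | detectar_faltantes
-- ===== SOURCE A (Python) =====
-- def detectar_faltantes(stock,solicitud):
--     cosas = dict()
--     for piezas in solicitud:
--         if piezas not in cosas: cosas[piezas] = 1
--         else: cosas[piezas] += 1
--     faltantes = dict()
--     for i in cosas:
--         if i not in stock:
--             faltantes[i] = cosas[i]
--         else:
--             if cosas[i] > stock[i]: faltantes[i] = cosas[i] - stock[i]
--     return faltantes
-- ===== SOURCE B (Python) =====
-- def detectar_faltantes(stock, solicitud):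
--     faltantes = {}
--     seen = set()
--     for p in solicitud:
--         if p not in seen:
--             seen.add(p)
--             d = solicitud.count(p) - (stock[p] if p in stock else 0)
--             if d > 0:
--                 faltantes[p] = d
--     return faltantes
-- ===== Notes on version B (the rewrite author's own statement) =====
-- stated objective: alternative
-- what changed: B drops A's counter dict entirely: one pass over solicitud with a seen-set, computing each distinct item's deficit on first occurrence as solicitud.count(p) minus its stock entry (0 if absent) and recording it only if positive.
import Mathlib
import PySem

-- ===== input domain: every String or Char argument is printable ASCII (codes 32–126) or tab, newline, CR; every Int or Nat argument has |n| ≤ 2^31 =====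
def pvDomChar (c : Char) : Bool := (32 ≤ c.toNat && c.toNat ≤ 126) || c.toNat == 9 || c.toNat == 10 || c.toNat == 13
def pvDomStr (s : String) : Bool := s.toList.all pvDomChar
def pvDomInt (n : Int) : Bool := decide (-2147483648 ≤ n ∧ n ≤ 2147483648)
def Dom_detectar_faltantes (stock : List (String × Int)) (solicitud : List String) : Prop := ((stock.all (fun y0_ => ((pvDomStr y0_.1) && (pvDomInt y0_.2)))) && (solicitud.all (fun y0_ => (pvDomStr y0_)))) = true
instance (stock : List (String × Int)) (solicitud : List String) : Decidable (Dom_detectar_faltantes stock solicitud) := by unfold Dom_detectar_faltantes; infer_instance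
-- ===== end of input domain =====

-- B replaces A's counter-dict-then-second-loop by a single pass with a seen-set that counts
-- each distinct item directly via solicitud.count (alternative algorithm, no counting dict; not faster).


-- ===== PORT A =====
def detectar_faltantes (stock : List (String × Int)) (solicitud : List String) : List (String × Int) :=
  let cosas := solicitud.foldl (fun d piezas =>
    if d.contains piezas = false then d.insert piezas 1 else d.insert piezas (d.getD piezas 0 + 1))
    (PySem.Dict.empty : PySem.Dict String Int)
  let faltantes := cosas.keys.foldl (fun f i =>
    if (PySem.Dict.mk stock).contains i = false then
      f.insert i (cosas.getD i 0)
    else if cosas.getD i 0 > (PySem.Dict.mk stock).getD i 0 then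
      f.insert i (cosas.getD i 0 - (PySem.Dict.mk stock).getD i 0)
    else f)
    (PySem.Dict.empty : PySem.Dict String Int)
  faltantes.items

-- ===== PORT B =====
def detectar_faltantes_alt (stock : List (String × Int)) (solicitud : List String) : List (String × Int) :=
  let st := solicitud.foldl (fun (st : PySem.Dict String Int × PySem.Set String) p =>
    if PySem.Set.contains st.2 p then st
    else
      let seen := PySem.Set.add st.2 p
      let d := (PySem.List.count solicitud p : Int) -
        (if (PySem.Dict.mk stock).contains p then (PySem.Dict.mk stock).getD p 0 else 0)
      if d > 0 then (st.1.insert p d, seen) else (st.1, seen))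
    ((PySem.Dict.empty : PySem.Dict String Int), (PySem.Set.empty : PySem.Set String))
  st.1.items

-- ===== PRECONDITION & SPEC =====
def Spec_detectar_faltantes (stock : List (String × Int)) (solicitud : List String) (out : List (String × Int)) : Prop := out = detectar_faltantes_alt stock solicitud
instance (stock : List (String × Int)) (solicitud : List String) (out : List (String × Int)) : Decidable (Spec_detectar_faltantes stock solicitud out) := by unfold Spec_detectar_faltantes; infer_instance

-- ===== CLAIM (what is proved, stated in full; the proofs are below) =====
def Claim_equal_detectar_faltantes : Prop := ∀ (stock : List (String × Int)) (solicitud : List String), Dom_detectar_faltantes stock solicitud → Spec_detectar_faltantes stock solicitud (detectar_faltantes stock solicitud)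

-- ===== LEMMAS AND PROOFS =====

-- the common canonical result: distinct requested items in first-occurrence order, positive deficits
def pvCanon (stock : List (String × Int)) (solicitud : List String) : List (String × Int) :=
  ((PySem.Set.ofList solicitud).filter
      (fun i => decide ((PySem.Dict.mk stock).getD i 0 < ((List.count i solicitud : Nat) : Int)))).map
    (fun i => (i, ((List.count i solicitud : Nat) : Int) - (PySem.Dict.mk stock).getD i 0))

-- keys of l not in s, in first-occurrence order (B's seen-set selection)
def pvNewKeys : PySem.Set String → List String → List String
  | _, [] => []
  | s, p :: rest =>
    if PySem.Set.contains s p then pvNewKeys s rest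
    else p :: pvNewKeys (PySem.Set.add s p) rest

theorem pvNewKeys_cons (s : PySem.Set String) (p : String) (rest : List String) :
    pvNewKeys s (p :: rest) =
      if PySem.Set.contains s p then pvNewKeys s rest
      else p :: pvNewKeys (PySem.Set.add s p) rest := rfl

theorem pv_not_true {b : Bool} (h : ¬ b = true) : b = false := by
  cases b with
  | false => rfl
  | true => exact absurd rfl h

theorem pvNewKeys_not_mem (s : PySem.Set String) (l : List String) :
    ∀ a ∈ pvNewKeys s l, PySem.Set.contains s a = false := by
  induction l generalizing s with
  | nil => intro a h; simp [pvNewKeys] at h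
  | cons p rest ih =>
    intro a h
    rw [pvNewKeys_cons] at h
    by_cases hc : PySem.Set.contains s p = true
    · rw [if_pos hc] at h; exact ih s a h
    · rw [if_neg hc] at h
      rcases List.mem_cons.mp h with h | h
      · subst h; simpa using hc
      · have h2 := ih (PySem.Set.add s p) a h
        cases hb : PySem.Set.contains s a with
        | false => rfl
        | true =>
          exfalso
          have hmem : a ∈ PySem.Set.add s p := by
            rw [PySem.Set.mem_add]
            exact Or.inl ((PySem.Set.contains_iff s a).mp hb)
          rw [(PySem.Set.contains_iff _ a).mpr hmem] at h2
          exact Bool.noConfusion h2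

theorem pvUpdate_eq_append_newKeys (s : PySem.Set String) (l : List String) :
    PySem.Set.update s l = s ++ pvNewKeys s l := by
  induction l generalizing s with
  | nil => simp [pvNewKeys, PySem.Set.update]
  | cons p rest ih =>
    rw [pvNewKeys_cons]
    by_cases hc : PySem.Set.contains s p = true
    · rw [if_pos hc]
      have hadd : PySem.Set.add s p = s :=
        PySem.Set.add_of_mem ((PySem.Set.contains_iff s p).mp hc)
      calc PySem.Set.update s (p :: rest)
          = PySem.Set.update (PySem.Set.add s p) rest := rfl
        _ = PySem.Set.update s rest := by rw [hadd]
        _ = s ++ pvNewKeys s rest := ih s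
    · rw [if_neg hc]
      have hadd : PySem.Set.add s p = s ++ [p] :=
        PySem.Set.add_of_not_mem (fun hm => hc ((PySem.Set.contains_iff s p).mpr hm))
      calc PySem.Set.update s (p :: rest)
          = PySem.Set.update (PySem.Set.add s p) rest := rfl
        _ = PySem.Set.add s p ++ pvNewKeys (PySem.Set.add s p) rest := ih _
        _ = s ++ (p :: pvNewKeys (PySem.Set.add s p) rest) := by rw [hadd]; simp

theorem pvNewKeys_empty (l : List String) :
    pvNewKeys PySem.Set.empty l = PySem.Set.ofList l := by
  have h := pvUpdate_eq_append_newKeys PySem.Set.empty l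
  have h2 : PySem.Set.update PySem.Set.empty l = PySem.Set.ofList l := rfl
  rw [h2] at h
  simpa [PySem.Set.empty] using h.symm

-- A conditional-insert loop over a Nodup list of keys fresh for d appends the selected pairs.
theorem pv_foldl_if_insert {ν : Type} (v : String → ν) (c : String → Bool)
    (l : List String) (d : PySem.Dict String ν) (hnd : l.Nodup)
    (hfresh : ∀ a ∈ l, d.contains a = false) :
    (l.foldl (fun f i => if c i then f.insert i (v i) else f) d).items
      = d.items ++ (l.filter c).map (fun i => (i, v i)) := by
  induction l generalizing d with
  | nil => simp
  | cons k rest ih =>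
    rcases List.nodup_cons.mp hnd with ⟨hk, hrest⟩
    have hfk : d.contains k = false := hfresh k (by simp)
    by_cases hc : c k
    · have hfresh' : ∀ a ∈ rest, (d.insert k (v k)).contains a = false := by
        intro a ha
        rw [PySem.Dict.contains_insert]
        have : a ≠ k := fun h => hk (h ▸ ha)
        simp [this, hfresh a (List.mem_cons_of_mem _ ha)]
      simp only [List.foldl_cons, if_pos hc, List.filter_cons_of_pos hc]
      rw [ih _ hrest hfresh', PySem.Dict.items_insert_of_not_contains _ _ hfk]
      simp
    · simp only [List.foldl_cons, List.filter_cons_of_neg (by simpa using hc)]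
      rw [if_neg (by simpa using hc)]
      exact ih _ hrest (fun a ha => hfresh a (List.mem_cons_of_mem _ ha))

-- ===== A = canonical =====
theorem detectar_faltantes_eq_canon (stock : List (String × Int)) (solicitud : List String) :
    detectar_faltantes stock solicitud = pvCanon stock solicitud := by
  unfold detectar_faltantes
  dsimp only
  -- the counting loop is Counter(solicitud)
  have hstep : (fun (d : PySem.Dict String Int) p =>
      if d.contains p = false then d.insert p 1 else d.insert p (d.getD p 0 + 1))
      = fun d p => d.insert p (d.getD p 0 + 1) := by
    funext d p
    by_cases h : d.contains p = false
    · rw [if_pos h, PySem.Dict.getD_of_not_contains d 0 h]; norm_num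
    · rw [if_neg h]
  rw [hstep, PySem.Dict.foldl_insert_getD_add_one_eq_counter]
  have hkeys : (PySem.Dict.counter solicitud).keys = PySem.Set.ofList solicitud :=
    PySem.Dict.keys_counter solicitud
  have hnd : (PySem.Dict.counter solicitud).keys.Nodup := PySem.Dict.nodup_keys_counter solicitud
  have hpos : ∀ i ∈ (PySem.Dict.counter solicitud).keys,
      (0 : Int) < ((List.count i solicitud : Nat) : Int) := by
    intro i hi
    rw [hkeys] at hi
    have hm : i ∈ solicitud := by simpa [PySem.Set.mem_ofList] using hi
    exact_mod_cast List.count_pos_iff.mpr hm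
  -- unify the three-way branch into one conditional insert
  rw [PySem.List.foldl_congr_mem' (PySem.Dict.counter solicitud).keys _
    (fun (f : PySem.Dict String Int) i =>
      if (decide ((PySem.Dict.mk stock).getD i 0 < ((List.count i solicitud : Nat) : Int))) then
        f.insert i (((List.count i solicitud : Nat) : Int) - (PySem.Dict.mk stock).getD i 0)
      else f)
    PySem.Dict.empty
    (by
      intro i hi f
      simp only [decide_eq_true_eq]
      rw [PySem.Dict.getD_counter]
      by_cases hco : (PySem.Dict.mk stock).contains i = true
      · rw [if_neg (by simp [hco])]
      · have hc' : (PySem.Dict.mk stock).contains i = false := pv_not_true hco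
        have h0 : (PySem.Dict.mk stock).getD i 0 = 0 :=
          PySem.Dict.getD_of_not_contains _ 0 hc'
        rw [if_pos hc', if_pos (by rw [h0]; exact hpos i hi), h0, sub_zero])]
  rw [pv_foldl_if_insert
      (fun i => ((List.count i solicitud : Nat) : Int) - (PySem.Dict.mk stock).getD i 0)
      (fun i => decide ((PySem.Dict.mk stock).getD i 0 < ((List.count i solicitud : Nat) : Int)))
      _ PySem.Dict.empty hnd (fun a _ => PySem.Dict.contains_empty a)]
  rw [hkeys]
  simp [pvCanon, PySem.Dict.empty]

-- ===== B = canonical =====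
theorem pv_alt_fold (stock : List (String × Int)) (solicitud : List String) :
    ∀ (l : List String) (s : PySem.Set String) (f : PySem.Dict String Int),
    (∀ a ∈ pvNewKeys s l, f.contains a = false) →
    (l.foldl (fun (st : PySem.Dict String Int × PySem.Set String) p =>
      if PySem.Set.contains st.2 p then st
      else
        let seen := PySem.Set.add st.2 p
        let d := (PySem.List.count solicitud p : Int) -
          (if (PySem.Dict.mk stock).contains p then (PySem.Dict.mk stock).getD p 0 else 0)
        if d > 0 then (st.1.insert p d, seen) else (st.1, seen)) (f, s)).1.items
      = f.items ++
        ((pvNewKeys s l).filter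
            (fun i => decide ((PySem.Dict.mk stock).getD i 0 < ((List.count i solicitud : Nat) : Int)))).map
          (fun i => (i, ((List.count i solicitud : Nat) : Int) - (PySem.Dict.mk stock).getD i 0)) := by
  intro l
  induction l with
  | nil => intro s f _; simp [pvNewKeys]
  | cons p rest ih =>
    intro s f hfresh
    simp only [List.foldl_cons]
    by_cases hc : PySem.Set.contains s p = true
    · rw [if_pos hc]
      have hnk : pvNewKeys s (p :: rest) = pvNewKeys s rest := by
        rw [pvNewKeys_cons, if_pos hc]
      rw [ih s f (by rw [← hnk]; exact hfresh), hnk]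
    · rw [if_neg hc]
      have hnk : pvNewKeys s (p :: rest) = p :: pvNewKeys (PySem.Set.add s p) rest := by
        rw [pvNewKeys_cons, if_neg hc]
      have hd : ((PySem.List.count solicitud p : Int) -
          (if (PySem.Dict.mk stock).contains p then (PySem.Dict.mk stock).getD p 0 else 0))
          = ((List.count p solicitud : Nat) : Int) - (PySem.Dict.mk stock).getD p 0 := by
        rw [PySem.List.count_eq]
        by_cases h : (PySem.Dict.mk stock).contains p = true
        · rw [if_pos h]
        · rw [if_neg h,
            PySem.Dict.getD_of_not_contains _ 0 (pv_not_true h), sub_zero]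
      have hp_fresh : f.contains p = false := hfresh p (by rw [hnk]; exact List.mem_cons_self)
      simp only [hd]
      by_cases hpos : (PySem.Dict.mk stock).getD p 0 < ((List.count p solicitud : Nat) : Int)
      · rw [if_pos (by omega)]
        have hfresh' : ∀ a ∈ pvNewKeys (PySem.Set.add s p) rest,
            (f.insert p (((List.count p solicitud : Nat) : Int) -
              (PySem.Dict.mk stock).getD p 0)).contains a = false := by
          intro a ha
          rw [PySem.Dict.contains_insert]
          have hane : a ≠ p := by
            have hcadd := pvNewKeys_not_mem (PySem.Set.add s p) rest a ha
            intro h; subst h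
            have : a ∈ PySem.Set.add s a := by rw [PySem.Set.mem_add]; exact Or.inr rfl
            rw [(PySem.Set.contains_iff _ a).mpr this] at hcadd
            exact Bool.noConfusion hcadd
          have hmem : a ∈ pvNewKeys s (p :: rest) := by
            rw [hnk]; exact List.mem_cons_of_mem _ ha
          simp [hane, hfresh a hmem]
        rw [ih _ _ hfresh', PySem.Dict.items_insert_of_not_contains _ _ hp_fresh]
        rw [hnk, List.filter_cons_of_pos (by simp [hpos])]
        simp
      · rw [if_neg (by omega)]
        have hfresh' : ∀ a ∈ pvNewKeys (PySem.Set.add s p) rest, f.contains a = false :=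
          fun a ha => hfresh a (by rw [hnk]; exact List.mem_cons_of_mem _ ha)
        rw [ih _ _ hfresh', hnk, List.filter_cons_of_neg (by simp [hpos])]

theorem detectar_faltantes_alt_eq_canon (stock : List (String × Int)) (solicitud : List String) :
    detectar_faltantes_alt stock solicitud = pvCanon stock solicitud := by
  unfold detectar_faltantes_alt
  dsimp only
  rw [pv_alt_fold stock solicitud solicitud PySem.Set.empty PySem.Dict.empty
    (fun a _ => PySem.Dict.contains_empty a)]
  rw [pvNewKeys_empty]
  simp [pvCanon, PySem.Dict.empty]

-- ===== VERDICT (by name: the statement is the Claim_ definition above) =====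
theorem detectar_faltantes_spec : Claim_equal_detectar_faltantes := by
  intro stock solicitud _
  unfold Spec_detectar_faltantes
  rw [detectar_faltantes_eq_canon, detectar_faltantes_alt_eq_canon]
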